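-- pv_equiv track=rewrite | github.com/salty-horse/python-wikiquotes | wikiquote/langs/en.py | is_quote
-- ===== SOURCE A (Python) =====
-- WORD_BLACKLIST = ['quoted', 'Variant:', 'Retrieved', 'Notes:']
--
-- MIN_QUOTE_LEN = 6
--
-- MIN_QUOTE_WORDS = 3
--
-- def is_quote(txt):
--     txt_split = txt.split()
--     invalid_conditions = [
--         not txt or not txt[0].isupper() or len(txt) < MIN_QUOTE_LEN,
--         len(txt_split) < MIN_QUOTE_WORDS,
--         any(True for word in txt_split if word in WORD_BLACKLIST),
--         any(word.endswith((')', ':', ']')) for word in txt_split),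
--     ]
--
--     # Returns false if any invalid conditions are true, otherwise returns True.
--     return not any(invalid_conditions)
-- ===== SOURCE B (Python) =====
-- WORD_BLACKLIST = ['quoted', 'Variant:', 'Retrieved', 'Notes:']
--
-- MIN_QUOTE_LEN = 6
--
-- MIN_QUOTE_WORDS = 3
--
-- def is_quote(txt):
--     # One streaming pass over the characters: tokenize by hand and judge each
--     # word as it completes, instead of building txt.split() and scanning it.
--     head_ok = bool(txt) and txt[0].isupper() and len(txt) >= MIN_QUOTE_LEN
--     words = 0
--     clean = True
--     cur = []
--     for c in txt:
--         if c.isspace():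
--             if cur:
--                 words += 1
--                 if ''.join(cur) in WORD_BLACKLIST or cur[-1] in ')]:':
--                     clean = False
--                 cur = []
--         else:
--             cur.append(c)
--     if cur:
--         words += 1
--         if ''.join(cur) in WORD_BLACKLIST or cur[-1] in ')]:':
--             clean = False
--     return head_ok and words >= MIN_QUOTE_WORDS and clean
-- ===== Notes on version B (the rewrite author's own statement) =====
-- stated objective: alternative
-- what changed: B makes a single streaming pass over the characters, tokenizing by hand with a current-word buffer and judging each word (blacklist membership, bad last character) the moment it completes, instead of A's txt.split() followed by separate any-scans over the word list.
import Mathlib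
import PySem

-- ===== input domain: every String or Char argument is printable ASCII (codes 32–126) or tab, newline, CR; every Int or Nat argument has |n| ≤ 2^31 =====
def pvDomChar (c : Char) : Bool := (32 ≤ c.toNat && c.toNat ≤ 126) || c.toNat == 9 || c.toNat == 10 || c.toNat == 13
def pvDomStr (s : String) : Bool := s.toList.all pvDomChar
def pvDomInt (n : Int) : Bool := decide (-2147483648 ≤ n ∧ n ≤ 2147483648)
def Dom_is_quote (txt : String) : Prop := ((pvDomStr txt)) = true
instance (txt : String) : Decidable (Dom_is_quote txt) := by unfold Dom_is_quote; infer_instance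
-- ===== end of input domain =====

-- B replaces split()-then-scan with a single streaming character pass that tokenizes by
-- hand and judges each word as it completes (objective: alternative); same results.

-- ===== PORT A =====
def pvBlacklist : List String := ["quoted", "Variant:", "Retrieved", "Notes:"]

def is_quote (txt : String) : Bool :=
  let txt_split := PySem.Str.split₀ txt
  let invalid_conditions : List Bool :=
    [ txt.toList.isEmpty
        || !(match txt.toList with | [] => false | c :: _ => PySem.Chars.isupper c)
        || decide (PySem.Str.len txt < 6),
      decide (txt_split.length < 3),
      txt_split.any (fun word => decide (word ∈ pvBlacklist)),
      txt_split.any (fun word =>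
        PySem.Str.endswith word ")" || PySem.Str.endswith word ":" || PySem.Str.endswith word "]") ]
  !(invalid_conditions.any id)

-- ===== PORT B =====
-- ''.join(cur) in WORD_BLACKLIST or cur[-1] in ')]:'
def pvBadCur (cur : List Char) : Bool :=
  decide (String.ofList cur ∈ pvBlacklist)
    || (match cur.getLast? with
        | some c => c == ')' || c == ']' || c == ':'
        | none => false)

-- the for-loop over the characters (state: cur, words, clean), with the
-- post-loop finalization of a pending word in the [] case
def pvGo : List Char → List Char → Nat → Bool → Nat × Bool
  | [], cur, words, clean =>
      if cur.isEmpty then (words, clean)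
      else (words + 1, if pvBadCur cur then false else clean)
  | c :: rest, cur, words, clean =>
      if PySem.Chars.isspace c then
        if cur.isEmpty then pvGo rest [] words clean
        else pvGo rest [] (words + 1) (if pvBadCur cur then false else clean)
      else pvGo rest (cur ++ [c]) words clean

def is_quote_alt (txt : String) : Bool :=
  let head_ok :=
    match txt.toList with
    | [] => false
    | c :: _ => PySem.Chars.isupper c && decide (6 ≤ PySem.Str.len txt)
  let res := pvGo txt.toList [] 0 true
  head_ok && decide (3 ≤ res.1) && res.2

-- ===== PRECONDITION & SPEC =====
def Spec_is_quote (txt : String) (out : Bool) : Prop := out = is_quote_alt txt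
instance (txt : String) (out : Bool) : Decidable (Spec_is_quote txt out) := by unfold Spec_is_quote; infer_instance

-- ===== CLAIM (what is proved, stated in full; the proofs are below) =====
def Claim_equal_is_quote : Prop := ∀ (txt : String), Dom_is_quote txt → Spec_is_quote txt (is_quote txt)

-- ===== LEMMAS AND PROOFS =====

-- the word judgement A makes on a finished word, phrased on the String side
def pvBadStr (w : String) : Bool :=
  decide (w ∈ pvBlacklist)
    || (PySem.Str.endswith w ")" || PySem.Str.endswith w ":" || PySem.Str.endswith w "]")

lemma pvEndswith_singleton (ws : List Char) (c : Char) :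
    PySem.Chars.endswith ws [c] = (ws.getLast? == some c) := by
  by_cases h : [c] <:+ ws
  · have h1 : PySem.Chars.endswith ws [c] = true := (PySem.Chars.endswith_iff ws [c]).mpr h
    obtain ⟨t, rfl⟩ := h
    simp [h1]
  · have h1 : PySem.Chars.endswith ws [c] = false := by
      cases hb : PySem.Chars.endswith ws [c]
      · rfl
      · exact absurd ((PySem.Chars.endswith_iff ws [c]).mp hb) h
    have h2 : ws.getLast? ≠ some c := by
      intro hh
      obtain ⟨t, rfl⟩ := List.getLast?_eq_some_iff.mp hh
      exact h ⟨t, rfl⟩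
    simp [h1, h2]

lemma pvBadCur_eq (w : List Char) : pvBadCur w = pvBadStr (String.ofList w) := by
  simp only [pvBadCur, pvBadStr, PySem.Str.endswith_eq, String.toList_ofList]
  have e1 : (")" : String).toList = [')'] := rfl
  have e2 : (":" : String).toList = [':'] := rfl
  have e3 : ("]" : String).toList = [']'] := rfl
  rw [e1, e2, e3, pvEndswith_singleton, pvEndswith_singleton, pvEndswith_singleton]
  cases h : w.getLast? with
  | none => simp
  | some c =>
    congr 1
    ac_rfl

lemma pvGo_acc (cs cur acc) :
    PySem.Chars.split₀.go cs cur acc = acc.reverse ++ PySem.Chars.split₀.go cs cur [] := by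
  induction cs generalizing cur acc with
  | nil => simp [PySem.Chars.split₀.go]; split_ifs <;> simp
  | cons c rest ih =>
    simp only [PySem.Chars.split₀.go]
    split_ifs with h1 h2
    · exact ih [] acc
    · rw [ih [] (cur.reverse :: acc), ih [] [cur.reverse]]
      simp
    · exact ih (c :: cur) acc

lemma pvGo_eq (cs : List Char) (cur : List Char) (w : Nat) (cl : Bool) :
    pvGo cs cur w cl =
      (w + (PySem.Chars.split₀.go cs cur.reverse []).length,
       cl && !((PySem.Chars.split₀.go cs cur.reverse []).any pvBadCur)) := by
  induction cs generalizing cur w cl with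
  | nil =>
    simp only [pvGo, PySem.Chars.split₀.go, List.isEmpty_reverse]
    by_cases h : cur.isEmpty
    · simp [h]
    · simp only [h, if_false, List.reverse_cons, List.reverse_nil, List.nil_append,
        List.reverse_reverse]
      cases hb : pvBadCur cur <;> simp [hb]
  | cons c rest ih =>
    simp only [pvGo, PySem.Chars.split₀.go, List.isEmpty_reverse]
    by_cases hs : PySem.Chars.isspace c
    · by_cases h : cur.isEmpty
      · simp only [hs, h, if_true]
        simpa using ih [] w cl
      · simp only [hs, h, if_true, if_false]
        rw [ih [] (w + 1) (if pvBadCur cur then false else cl)]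
        rw [pvGo_acc rest [] [cur.reverse.reverse]]
        simp only [Bool.false_eq_true, if_false, List.reverse_nil, List.reverse_cons,
          List.nil_append, List.reverse_reverse, List.singleton_append, List.length_cons,
          List.any_cons, Prod.mk.injEq]
        refine ⟨by omega, ?_⟩
        cases hb : pvBadCur cur <;> cases cl <;> simp [hb]
    · simp only [hs, if_false]
      rw [ih (cur ++ [c]) w cl]
      simp

lemma pvAny_or {α : Type} (ws : List α) (p q : α → Bool) :
    ws.any (fun w => p w || q w) = (ws.any p || ws.any q) := by
  induction ws with
  | nil => rfl
  | cons w ws ih =>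
    simp only [List.any_cons, ih]
    cases p w <;> cases q w <;> simp

-- ===== VERDICT (by name: the statement is the Claim_ definition above) =====
theorem is_quote_spec : Claim_equal_is_quote := by
  intro txt _
  unfold Spec_is_quote is_quote is_quote_alt
  obtain ⟨l, rfl⟩ : ∃ l : List Char, txt = String.ofList l := ⟨txt.toList, by simp⟩
  simp only [PySem.Str.split₀, pvGo_eq, List.reverse_nil, PySem.Chars.split₀, PySem.Str.len_eq,
    String.toList_ofList]
  cases l with
  | nil =>
    simp [show PySem.Chars.split₀.go [] [] [] = [] from rfl]
  | cons c cs =>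
    simp only [List.isEmpty_cons, Bool.false_or, List.length_map, List.any_map, Function.comp_def,
      Nat.zero_add, Bool.true_and]
    simp only [List.any_cons, List.any_nil, id, Bool.or_false]
    rw [← pvAny_or, show (fun x : List Char => decide (String.ofList x ∈ pvBlacklist) ||
          (PySem.Str.endswith (String.ofList x) ")" || PySem.Str.endswith (String.ofList x) ":" ||
           PySem.Str.endswith (String.ofList x) "]")) = pvBadCur from
        funext fun x => (pvBadCur_eq x).symm]
    simp only [← not_le, decide_not]
    cases hu : PySem.Chars.isupper c <;>
      cases h6 : decide ((6:Int) ≤ ↑(c :: cs).length) <;>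
        cases h3 : decide (3 ≤ (PySem.Chars.split₀.go (c :: cs) [] []).length) <;>
          cases ha : (PySem.Chars.split₀.go (c :: cs) [] []).any pvBadCur <;>
            simp [hu, h6, h3, ha]
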